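-- pv_equiv track=rewrite | github.com/Tronnert/BlockchainArbitration | analysis/time.py | find
-- ===== SOURCE A (Python) =====
-- def find(rows):
--     N = 10 ** 8
--     if len(rows) == 1:
--         return [N]
--     arbitrages = []
--     rows.sort(key=lambda x: x["dt"])
--     old = rows[0]
--     dur = 0
--     for row in rows[1:]:
--         if row["revenue"] > 0 and old["revenue"] > 0:
--             dur += row["dt"] - old["dt"]
--         elif row["revenue"] <= 0 and old["revenue"] > 0:
--             arbitrages.append(dur + N)
--             dur = 0
--         old = row
--     if row["revenue"] > 0:
--         arbitrages.append(dur + N)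
--     return arbitrages
-- ===== SOURCE B (Python) =====
-- def find(rows):
--     N = 10 ** 8
--     if len(rows) == 1:
--         return [N]
--     rows.sort(key=lambda x: x["dt"])
--     # stage 1: partition the sorted rows into maximal runs of equal revenue sign
--     runs = []
--     for row in rows:
--         if runs and (runs[-1][0]["revenue"] > 0) == (row["revenue"] > 0):
--             runs[-1].append(row)
--         else:
--             runs.append([row])
--     # stage 2: one interval per positive-revenue run
--     return [g[-1]["dt"] - g[0]["dt"] + N for g in runs if g[0]["revenue"] > 0]
-- ===== Notes on version B (the rewrite author's own statement) =====
-- stated objective: alternative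
-- what changed: Replaces A's single-pass pairwise old/row duration accumulator by two staged passes: first partition the sorted rows into maximal runs of equal revenue sign (a groupby-style intermediate list of runs), then a comprehension emitting last_dt - first_dt + N for each positive run.
import Mathlib
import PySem

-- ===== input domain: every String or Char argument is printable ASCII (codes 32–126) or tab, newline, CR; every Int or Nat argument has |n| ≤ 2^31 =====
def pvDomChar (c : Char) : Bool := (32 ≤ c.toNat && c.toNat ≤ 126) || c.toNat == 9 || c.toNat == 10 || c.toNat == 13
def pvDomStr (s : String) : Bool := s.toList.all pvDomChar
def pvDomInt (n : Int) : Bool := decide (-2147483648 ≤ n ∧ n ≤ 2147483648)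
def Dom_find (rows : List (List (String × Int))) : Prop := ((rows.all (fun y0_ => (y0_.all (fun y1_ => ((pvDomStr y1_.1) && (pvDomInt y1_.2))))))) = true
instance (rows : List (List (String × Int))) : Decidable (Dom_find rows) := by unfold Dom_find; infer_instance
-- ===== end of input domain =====

-- B replaces A's single-pass pairwise old/row duration accumulator by two staged passes:
-- partition the sorted rows into maximal runs of equal revenue sign, then a comprehension
-- emitting last_dt - first_dt + N per positive run. Both A and B sort `rows` in place;
-- the equivalence proved here is about the return value.

-- row["k"]: rows are Python dicts, so a row is read with dict semantics (KeyError cases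
-- are excluded by Pre_find; the getD default is never used inside Pre_find)
def pvRow (row : List (String × Int)) (k : String) : Int :=
  ((PySem.Dict.ofList row).get? k).getD 0

-- ===== PORT A =====
-- the loop body of A: state = (old, dur, arbitrages)
def findStep (st : (List (String × Int)) × Int × List Int) (row : List (String × Int)) :
    (List (String × Int)) × Int × List Int :=
  let (old, dur, arbitrages) := st
  if pvRow row "revenue" > 0 ∧ pvRow old "revenue" > 0 then
    (row, dur + (pvRow row "dt" - pvRow old "dt"), arbitrages)
  else if pvRow row "revenue" ≤ 0 ∧ pvRow old "revenue" > 0 then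
    (row, 0, arbitrages ++ [dur + 10 ^ 8])
  else (row, dur, arbitrages)

def find (rows : List (List (String × Int))) : List Int :=
  let N : Int := 10 ^ 8
  if rows.length = 1 then [N]
  else
    let sorted := PySem.List.sorted rows (fun x => pvRow x "dt") false
    match sorted with
    | [] => []  -- Python raises IndexError at rows[0]; rows = [] is excluded by Pre_find
    | first :: rest =>
      let (old, dur, arbitrages) := rest.foldl findStep (first, 0, ([] : List Int))
      -- after the loop Python's `row` is the last row = `old` (rest ≠ [] inside Pre_find)
      if pvRow old "revenue" > 0 then arbitrages ++ [dur + N] else arbitrages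

-- ===== PORT B =====
-- stage-1 loop body: extend the last run when the revenue sign matches, else open a new run
def addRun (runs : List (List (List (String × Int)))) (row : List (String × Int)) :
    List (List (List (String × Int))) :=
  match runs.getLast? with
  | some g =>
      if (decide (pvRow ((PySem.List.pyGet? g 0).getD []) "revenue" > 0)
            = decide (pvRow row "revenue" > 0)) then
        runs.dropLast ++ [g ++ [row]]
      else runs ++ [[row]]
  | none => runs ++ [[row]]

def find_alt (rows : List (List (String × Int))) : List Int :=
  let N : Int := 10 ^ 8
  if rows.length = 1 then [N]
  else
    let sorted := PySem.List.sorted rows (fun x => pvRow x "dt") false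
    let runs := sorted.foldl addRun []
    (runs.filter (fun g => decide (pvRow ((PySem.List.pyGet? g 0).getD []) "revenue" > 0))).map
      (fun g => pvRow ((PySem.List.pyGet? g (-1)).getD []) "dt"
        - pvRow ((PySem.List.pyGet? g 0).getD []) "dt" + N)

-- ===== PRECONDITION & SPEC =====
-- Pre_ excludes the empty list (A raises IndexError there) and, for two or more rows,
-- rows missing a "dt" or "revenue" key (A raises KeyError there); a single row needs no
-- keys, since A's len==1 guard returns before any key access.
def Pre_find (rows : List (List (String × Int))) : Prop :=
  rows ≠ [] ∧ (rows.length = 1 ∨ ∀ row ∈ rows,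
    (PySem.Dict.ofList row).contains "dt" ∧ (PySem.Dict.ofList row).contains "revenue")
instance (rows : List (List (String × Int))) : Decidable (Pre_find rows) := by
  unfold Pre_find; infer_instance

def pvWitness_find : (List (List (String × Int))) :=
  [[("dt", 3), ("revenue", 1)], [("dt", 1), ("revenue", 2)], [("dt", 7), ("revenue", 0)]]

def Spec_find (rows : List (List (String × Int))) (out : List Int) : Prop := out = find_alt rows
instance (rows : List (List (String × Int))) (out : List Int) : Decidable (Spec_find rows out) := by
  unfold Spec_find; infer_instance

-- ===== CLAIM =====
def Claim_equal_find : Prop := ∀ (rows : List (List (String × Int))), Dom_find rows → Pre_find rows → Spec_find rows (find rows)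

-- ===== LEMMAS AND PROOFS =====

-- the revenue sign of a row, the run key
def rkey (r : List (String × Int)) : Bool := decide (pvRow r "revenue" > 0)

-- recursive characterisation of the run partition built by stage 1
def groupsAux (cur : List (List (String × Int))) (l : List (List (String × Int))) :
    List (List (List (String × Int))) :=
  match l with
  | [] => [cur]
  | r :: rs =>
      if rkey ((PySem.List.pyGet? cur 0).getD []) = rkey r then groupsAux (cur ++ [r]) rs
      else cur :: groupsAux [r] rs

-- stage 2 as a function of the run list
def emitRuns (runs : List (List (List (String × Int)))) : List Int :=
  (runs.filter (fun g => decide (pvRow ((PySem.List.pyGet? g 0).getD []) "revenue" > 0))).map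
    (fun g => pvRow ((PySem.List.pyGet? g (-1)).getD []) "dt"
      - pvRow ((PySem.List.pyGet? g 0).getD []) "dt" + 10 ^ 8)

theorem foldl_addRun_groupsAux (l : List (List (String × Int))) :
    ∀ (done : List (List (List (String × Int)))) (cur : List (List (String × Int))),
      cur ≠ [] → l.foldl addRun (done ++ [cur]) = done ++ groupsAux cur l := by
  induction l with
  | nil => intro done cur _; simp [groupsAux]
  | cons r rs ih =>
    intro done cur hcur
    have hlast : (done ++ [cur]).getLast? = some cur := by simp
    by_cases hk : rkey ((PySem.List.pyGet? cur 0).getD []) = rkey r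
    · have : addRun (done ++ [cur]) r = done ++ [cur ++ [r]] := by
        simp only [addRun, hlast, rkey] at *
        rw [if_pos hk]
        simp
      simp only [List.foldl_cons, this, groupsAux, if_pos hk]
      exact ih done (cur ++ [r]) (by simp)
    · have : addRun (done ++ [cur]) r = (done ++ [cur]) ++ [[r]] := by
        simp only [addRun, hlast, rkey] at *
        rw [if_neg hk]
      simp only [List.foldl_cons, this, groupsAux, if_neg hk]
      rw [ih (done ++ [cur]) [r] (by simp)]
      simp

-- A's trailing flush applied to a loop state
def finishA (st : (List (String × Int)) × Int × List Int) : List Int :=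
  if pvRow st.1 "revenue" > 0 then st.2.2 ++ [st.2.1 + 10 ^ 8] else st.2.2

theorem main_inv (l : List (List (String × Int))) :
    ∀ (c0 : List (String × Int)) (ct : List (List (String × Int))) (a : List Int) (dur : Int),
      rkey ((c0 :: ct).getLast (by simp)) = rkey c0 →
      dur = (if rkey c0 then
        pvRow ((c0 :: ct).getLast (by simp)) "dt" - pvRow c0 "dt" else 0) →
      finishA (l.foldl findStep ((c0 :: ct).getLast (by simp), dur, a))
        = a ++ emitRuns (groupsAux (c0 :: ct) l) := by
  induction l with
  | nil =>
    intro c0 ct a dur hk hd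
    by_cases h : rkey c0
    · simp only [List.foldl_nil, groupsAux, emitRuns, finishA]
      have hk' : rkey ((c0 :: ct).getLast (by simp)) = true := hk.trans h
      simp only [rkey, decide_eq_true_eq] at h hk'
      simp [h, hk', hd, rkey, PySem.List.pyGet?_neg_one, List.getLast?_eq_some_getLast]
    · simp only [List.foldl_nil, groupsAux, emitRuns, finishA]
      have hk' : rkey ((c0 :: ct).getLast (by simp)) = false := hk.trans (by simpa using h)
      simp only [rkey, decide_eq_true_eq, decide_eq_false_iff_not] at h hk'
      simp [hk', h]
  | cons r rs ih =>
    intro c0 ct a dur hk hd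
    set old := (c0 :: ct).getLast (by simp) with hold
    by_cases hkr : rkey r = rkey c0
    · -- same sign: run extends; A takes branch 1 (both positive) or branch 3 (both ≤ 0)
      have hstep : findStep (old, dur, a) r
          = (r, (if rkey c0 then pvRow r "dt" - pvRow c0 "dt" else 0), a) := by
        by_cases h : rkey c0
        · have h1 : pvRow r "revenue" > 0 := by
            have := hkr.trans h; simpa [rkey] using this
          have h2 : pvRow old "revenue" > 0 := by
            have := hk.trans h; simpa [rkey] using this
          simp [findStep, h1, h2, hd, h]
        · have h1 : ¬ pvRow r "revenue" > 0 := by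
            have := hkr.trans (eq_false_of_ne_true h); simpa [rkey] using this
          have h2 : ¬ pvRow old "revenue" > 0 := by
            have := hk.trans (eq_false_of_ne_true h); simpa [rkey] using this
          simp [findStep, h1, h2, hd, h]
      have hg : groupsAux (c0 :: ct) (r :: rs) = groupsAux (c0 :: (ct ++ [r])) rs := by
        simp only [groupsAux, PySem.List.pyGet?_zero_cons, Option.getD_some]
        rw [if_pos hkr.symm]
        congr 1
      have hlast : ((c0 :: (ct ++ [r])).getLast (by simp)) = r := by
        simp
      have := ih c0 (ct ++ [r]) a (if rkey c0 then pvRow r "dt" - pvRow c0 "dt" else 0)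
        (by rw [hlast, hkr]) (by rw [hlast])
      rw [List.foldl_cons, hstep, hg]
      rw [hlast] at this
      exact this
    · -- sign change: run closes; A takes branch 2 (pos→≤0) or branch 3 (≤0→pos)
      have hg : groupsAux (c0 :: ct) (r :: rs) = (c0 :: ct) :: groupsAux [r] rs := by
        simp only [groupsAux, PySem.List.pyGet?_zero_cons, Option.getD_some]
        rw [if_neg (fun h => hkr h.symm)]
      by_cases h : rkey c0
      · -- positive run ends at r (r nonpositive): A appends dur + N
        have h1 : ¬ pvRow r "revenue" > 0 := by
          have : rkey r = false := by
            cases hr : rkey r with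
            | true => exact absurd (hr.trans (h.symm)) hkr
            | false => rfl
          simpa [rkey] using this
        have h2 : pvRow old "revenue" > 0 := by
          have := hk.trans h; simpa [rkey] using this
        have hstep : findStep (old, dur, a) r = (r, 0, a ++ [dur + 10 ^ 8]) := by
          simp [findStep, h1, h2, le_of_not_gt h1]
        have hemit : emitRuns ((c0 :: ct) :: groupsAux [r] rs)
            = (pvRow old "dt" - pvRow c0 "dt" + 10 ^ 8) :: emitRuns (groupsAux [r] rs) := by
          have hc : pvRow c0 "revenue" > 0 := by simpa [rkey] using h
          simp [emitRuns, hc, PySem.List.pyGet?_neg_one,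
            List.getLast?_eq_some_getLast, ← hold]
        have := ih r [] (a ++ [dur + 10 ^ 8]) 0 (by simp)
          (by simp [h1, rkey])
        rw [List.foldl_cons, hstep, hg, hemit]
        simp only [List.getLast_singleton] at this
        rw [this, hd, if_pos h]
        simp
      · -- nonpositive run ends at r (r positive): nothing emitted, dur stays 0
        have h1 : pvRow r "revenue" > 0 := by
          have : rkey r = true := by
            cases hr : rkey r with
            | false => exact absurd (hr.trans ((eq_false_of_ne_true h).symm)) hkr
            | true => rfl
          simpa [rkey] using this
        have h2 : ¬ pvRow old "revenue" > 0 := by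
          have := hk.trans (eq_false_of_ne_true h); simpa [rkey] using this
        have hstep : findStep (old, dur, a) r = (r, dur, a) := by
          simp [findStep, h1, h2]
        have hemit : emitRuns ((c0 :: ct) :: groupsAux [r] rs) = emitRuns (groupsAux [r] rs) := by
          have hc : ¬ pvRow c0 "revenue" > 0 := by simpa [rkey] using h
          simp [emitRuns, hc]
        have := ih r [] a dur (by simp)
          (by rw [hd, if_neg h]; simp [rkey, h1])
        rw [List.foldl_cons, hstep, hg, hemit]
        simpa using this

-- ===== VERDICT =====
theorem find_spec : Claim_equal_find := by
  unfold Claim_equal_find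
  intro rows _ hpre
  by_cases hlen : rows.length = 1
  · unfold Spec_find find find_alt
    simp [hlen]
  · rcases hkind : PySem.List.sorted rows (fun x => pvRow x "dt") false with _ | ⟨first, rest⟩
    · exfalso
      apply hpre.1
      have hl := congrArg List.length hkind
      rw [PySem.List.length_sorted] at hl
      exact List.length_eq_zero_iff.mp hl
    · have hmain := main_inv rest first [] ([] : List Int) 0 (by simp) (by simp)
      have hruns : rest.foldl addRun ([] ++ [[first]]) = [] ++ groupsAux [first] rest :=
        foldl_addRun_groupsAux rest [] [first] (by simp)
      unfold Spec_find find find_alt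
      rw [hkind]
      simp only [hlen, if_false, List.foldl_cons]
      have hfirst : addRun [] first = [[first]] := by simp [addRun]
      rw [hfirst] at *
      simp only [List.getLast_singleton] at hmain
      rw [show ([[first]] : List (List (List (String × Int)))) = [] ++ [[first]] from rfl, hruns]
      simpa [finishA, emitRuns] using hmain
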